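-- pv_equiv track=rewrite | github.com/YukiYJ/OS_scheduling_algorithms | knapsack.py | knapsack_f
-- ===== SOURCE A (Python) =====
-- def knapsack_f(x,y,z,s):
-- 	all_results = []
-- 	for i in range(10):
-- 		for j in range(10):
-- 			for k in range(10):
-- 				total = i * x + j * y + k * z
-- 				if (total <= s):
-- 					all_results.append([i,j,k,total])
-- 	all_results.sort(key = lambda x: x[3], reverse = True)
-- 	return all_results
-- ===== SOURCE B (Python) =====
-- def knapsack_f(x, y, z, s):
--     # Online insertion sort: decode a flat 0..999 index and insert each valid
--     # combo into its place in an always-descending result (stable: ties go after).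
--     result = []
--     for n in range(1000):
--         i, j, k = n // 100, n // 10 % 10, n % 10
--         t = i * x + j * y + k * z
--         if t <= s:
--             pos = 0
--             while pos < len(result) and result[pos][3] >= t:
--                 pos += 1
--             result.insert(pos, [i, j, k, t])
--     return result
-- ===== Notes on version B (the rewrite author's own statement) =====
-- stated objective: alternative
-- what changed: Replaces nested i/j/k loops that append to a flat list and then call a global stable sort with a single pass over a flat 0..999 index that decodes the digits and maintains the result in descending order by stable linear insertion (online insertion sort, no sort call).
import Mathlib
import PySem

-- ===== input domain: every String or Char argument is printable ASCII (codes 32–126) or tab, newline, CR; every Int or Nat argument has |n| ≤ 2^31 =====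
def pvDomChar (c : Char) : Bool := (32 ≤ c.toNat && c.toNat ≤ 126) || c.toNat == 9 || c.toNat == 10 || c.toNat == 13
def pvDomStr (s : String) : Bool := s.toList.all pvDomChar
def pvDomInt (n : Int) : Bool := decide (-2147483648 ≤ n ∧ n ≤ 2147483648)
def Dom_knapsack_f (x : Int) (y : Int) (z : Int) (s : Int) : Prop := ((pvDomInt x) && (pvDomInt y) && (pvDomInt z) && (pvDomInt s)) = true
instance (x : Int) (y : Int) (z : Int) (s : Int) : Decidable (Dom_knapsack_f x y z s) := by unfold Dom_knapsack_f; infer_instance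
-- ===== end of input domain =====

-- B replaces nested loops + a global sort by a single pass over a flat 0..999 index that keeps the
-- result descending-sorted via stable linear insertion (online insertion sort); objective: alternative.

-- ===== PORT A =====
def knapsack_f (x : Int) (y : Int) (z : Int) (s : Int) : List (List Int) :=
  let all_results := (PySem.List.pyRange 0 10 1).foldl (fun acc i =>
    (PySem.List.pyRange 0 10 1).foldl (fun acc j =>
      (PySem.List.pyRange 0 10 1).foldl (fun acc k =>
        let total := i * x + j * y + k * z
        if total ≤ s then acc ++ [[i, j, k, total]] else acc) acc) acc) ([] : List (List Int))
  PySem.List.sorted all_results (fun r => PySem.List.pyGetD r 3 0) true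

-- ===== PORT B =====
-- B's while loop scans for the first position whose stored total is < t and then inserts there;
-- this helper fuses that scan with the insertion (exact: the prefix before the found position is
-- untouched by result.insert).
def pvInsLoop (item : List Int) : List (List Int) → List (List Int)
  | [] => [item]
  | r :: rest =>
    if PySem.List.pyGetD r 3 0 ≥ PySem.List.pyGetD item 3 0 then r :: pvInsLoop item rest
    else item :: r :: rest

def knapsack_f_alt (x : Int) (y : Int) (z : Int) (s : Int) : List (List Int) :=
  (PySem.List.pyRange 0 1000 1).foldl (fun result n =>
    let i := PySem.Int.floordiv n 100
    let j := PySem.Int.mod (PySem.Int.floordiv n 10) 10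
    let k := PySem.Int.mod n 10
    let t := i * x + j * y + k * z
    if t ≤ s then pvInsLoop [i, j, k, t] result else result) []

-- ===== PRECONDITION & SPEC =====
def Spec_knapsack_f (x : Int) (y : Int) (z : Int) (s : Int) (out : List (List Int)) : Prop := out = knapsack_f_alt x y z s
instance (x : Int) (y : Int) (z : Int) (s : Int) (out : List (List Int)) : Decidable (Spec_knapsack_f x y z s out) := by unfold Spec_knapsack_f; infer_instance

-- ===== CLAIM (what is proved, stated in full; the proofs are below) =====
def Claim_equal_knapsack_f : Prop := ∀ (x : Int) (y : Int) (z : Int) (s : Int), Dom_knapsack_f x y z s → Spec_knapsack_f x y z s (knapsack_f x y z s)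

-- ===== LEMMAS AND PROOFS =====

def pvKey (e : List Int) : Int := PySem.List.pyGetD e 3 0

-- all 1000 candidate entries in generation order
def pvCand (x y z : Int) : List (List Int) :=
  (PySem.List.pyRange 0 10 1).flatMap fun i =>
    (PySem.List.pyRange 0 10 1).flatMap fun j =>
      (PySem.List.pyRange 0 10 1).map fun k => [i, j, k, i * x + j * y + k * z]

lemma pvLoop (x y z s : Int) {β : Type} (f : β → List Int → β) (init : β) :
    (PySem.List.pyRange 0 10 1).foldl (fun acc i =>
      (PySem.List.pyRange 0 10 1).foldl (fun acc j =>
        (PySem.List.pyRange 0 10 1).foldl (fun acc k =>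
          let total := i * x + j * y + k * z
          if total ≤ s then f acc [i, j, k, total] else acc) acc) acc) init
    = ((pvCand x y z).filter (fun e => decide (pvKey e ≤ s))).foldl f init := by
  rw [List.foldl_filter]
  simp only [pvCand, List.foldl_flatMap, List.foldl_map]
  congr 1; funext acc i; congr 1; funext acc j; congr 1; funext acc k
  show (if pvKey [i,j,k,i*x+j*y+k*z] ≤ s then _ else _) = _
  simp

lemma pvA_all (x y z s : Int) :
    (PySem.List.pyRange 0 10 1).foldl (fun acc i =>
      (PySem.List.pyRange 0 10 1).foldl (fun acc j =>
        (PySem.List.pyRange 0 10 1).foldl (fun acc k =>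
          let total := i * x + j * y + k * z
          if total ≤ s then acc ++ [[i, j, k, total]] else acc) acc) acc) ([] : List (List Int))
    = (pvCand x y z).filter (fun e => pvKey e ≤ s) := by
  have h := pvLoop x y z s (fun acc e => acc ++ [e]) []
  rw [h, PySem.List.foldl_append_singleton, List.nil_append]

lemma pvIns_eq (item : List Int) (res : List (List Int)) :
    pvInsLoop item res
      = PySem.List.insertBy (fun a b => decide (pvKey b < pvKey a)) item res := by
  induction res with
  | nil => rfl
  | cons r rest ih =>
    simp only [pvInsLoop, PySem.List.insertBy]
    by_cases h : PySem.List.pyGetD r 3 0 < PySem.List.pyGetD item 3 0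
    · rw [if_neg (by simpa using not_le.mpr h), if_pos (by simpa [pvKey] using h)]
    · rw [if_pos (by simpa using not_lt.mp h), if_neg (by simpa [pvKey] using h), ih]

-- the flat 0..999 decode enumerates exactly the nested triples, in order (closed computation)
set_option maxRecDepth 40000 in
lemma pvDecode :
    (PySem.List.pyRange 0 1000 1).map (fun n =>
        (PySem.Int.floordiv n 100, PySem.Int.mod (PySem.Int.floordiv n 10) 10, PySem.Int.mod n 10))
      = (PySem.List.pyRange 0 10 1).flatMap (fun i =>
          (PySem.List.pyRange 0 10 1).flatMap (fun j =>
            (PySem.List.pyRange 0 10 1).map (fun k => (i, j, k)))) := by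
  decide

set_option maxRecDepth 40000 in
lemma pvB_eq (x y z s : Int) :
    knapsack_f_alt x y z s
      = ((pvCand x y z).filter (fun e => pvKey e ≤ s)).foldl
          (fun acc e => PySem.List.insertBy (fun a b => decide (pvKey b < pvKey a)) e acc) [] := by
  unfold knapsack_f_alt
  have hmap := List.foldl_map
    (f := fun n : Int =>
      (PySem.Int.floordiv n 100, PySem.Int.mod (PySem.Int.floordiv n 10) 10, PySem.Int.mod n 10))
    (g := fun (result : List (List Int)) (p : Int × Int × Int) =>
      let t := p.1 * x + p.2.1 * y + p.2.2 * z
      if t ≤ s then pvInsLoop [p.1, p.2.1, p.2.2, t] result else result)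
    (l := PySem.List.pyRange 0 1000 1) (init := ([] : List (List Int)))
  rw [← hmap, pvDecode, List.foldl_flatMap]
  simp only [List.foldl_flatMap, List.foldl_map]
  rw [← pvLoop x y z s
    (fun acc e => PySem.List.insertBy (fun a b => decide (pvKey b < pvKey a)) e acc) []]
  congr 1; funext acc i; congr 1; funext acc j; congr 1; funext acc k
  simp only [pvIns_eq]

-- ===== VERDICT (by name: the statement is the Claim_ definition above) =====
theorem knapsack_f_spec : Claim_equal_knapsack_f := by
  intro x y z s _hd
  show knapsack_f x y z s = knapsack_f_alt x y z s
  unfold knapsack_f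
  rw [pvA_all, pvB_eq,
    show (fun r => PySem.List.pyGetD r 3 0) = pvKey from rfl,
    PySem.List.sorted_rev_eq_foldl_insertBy]
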